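-- pv_equiv track=rewrite | github.com/jalencato/my_leetcode_solution | 2021/previous/Aug/1548/1548.py | mostSimilar
-- ===== SOURCE A (Python) =====
-- from functools import lru_cache
-- from typing import List
--
-- def mostSimilar(n: int, roads: List[List[int]], names: List[str], targetPath: List[str]) -> List[int]:
--     graph = [[] for i in range(n)]
--     for road in roads:
--         graph[road[0]].append(road[1])
--         graph[road[1]].append(road[0])
--     # Point target
--
--     @lru_cache(None)
--     def dp(path_length, node):
--         if path_length == -1:
--             return 0, None
--         edit_difference = float('inf')
--         res_node = None
--         for adjacent in graph[node]:
--             prev_length, prev_node = dp(path_length - 1, adjacent)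
--             if prev_length < edit_difference:
--                 edit_difference = prev_length
--                 res_node = adjacent
--         if names[node] != targetPath[path_length]:
--             edit_difference += 1
--         return edit_difference, res_node
--
--     mn = float('inf')
--     end = None
--     for i in range(n):
--         dis, _ = dp(len(targetPath) - 1, i)
--         if dis < mn:
--             mn = dis
--             end = i
--
--     # here, we construct the path from end to start, and reverse the path
--     path = [end]
--     for idx in range(len(targetPath) - 1, 0, -1):
--         _, end = dp(idx, end)
--         path.append(end)
--     return path[::-1]
-- ===== SOURCE B (Python) =====
-- from typing import List
--
-- def mostSimilar(n: int, roads: List[List[int]], names: List[str], targetPath: List[str]) -> List[int]: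
--     graph = [[] for _ in range(n)]
--     for road in roads:
--         graph[road[0]].append(road[1])
--         graph[road[1]].append(road[0])
--
--     INF = float('inf')
--     # bottom-up DP over target positions: prev[v] = min edit distance of a
--     # path of k nodes ending at v; parents[k][v] = first neighbor achieving it
--     prev = [0] * n
--     parents = []
--     for tgt in targetPath:
--         level = []
--         for v in range(n):
--             best, bnode = INF, None
--             for adj in graph[v]:
--                 if prev[adj] < best:
--                     best, bnode = prev[adj], adj
--             if names[v] != tgt:
--                 best = best + 1
--             level.append((best, bnode))
--         prev = [c for c, _ in level]
--         parents.append([p for _, p in level])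
--
--     # first node with the strictly smallest cost
--     end, best = 0, prev[0]
--     for v in range(1, n):
--         if prev[v] < best:
--             best, end = prev[v], v
--
--     # walk the parent tables backwards; the path comes out back-to-front
--     path = [end]
--     for par in reversed(parents[1:]):
--         end = par[end]
--         path.append(end)
--     path.reverse()
--     return path
-- ===== Notes on version B (the rewrite author's own statement) =====
-- stated objective: alternative
-- what changed: Replaces the lru_cache top-down recursion (whose dp is re-called during path reconstruction) with bottom-up tabulation: one cost/parent level per target position, then a first-wins argmin scan and a backward walk over the stored parent tables.
-- outside the precondition, e.g. on mostSimilar(2, [[-1, 0]], ['a', 'b', 'c'], ['c', 'b']): A returns [-1, 0], B returns [0, 1]; on mostSimilar(2, [], ['a', 'b'], ['a']): A returns [None], B returns [0]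
import Mathlib
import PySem

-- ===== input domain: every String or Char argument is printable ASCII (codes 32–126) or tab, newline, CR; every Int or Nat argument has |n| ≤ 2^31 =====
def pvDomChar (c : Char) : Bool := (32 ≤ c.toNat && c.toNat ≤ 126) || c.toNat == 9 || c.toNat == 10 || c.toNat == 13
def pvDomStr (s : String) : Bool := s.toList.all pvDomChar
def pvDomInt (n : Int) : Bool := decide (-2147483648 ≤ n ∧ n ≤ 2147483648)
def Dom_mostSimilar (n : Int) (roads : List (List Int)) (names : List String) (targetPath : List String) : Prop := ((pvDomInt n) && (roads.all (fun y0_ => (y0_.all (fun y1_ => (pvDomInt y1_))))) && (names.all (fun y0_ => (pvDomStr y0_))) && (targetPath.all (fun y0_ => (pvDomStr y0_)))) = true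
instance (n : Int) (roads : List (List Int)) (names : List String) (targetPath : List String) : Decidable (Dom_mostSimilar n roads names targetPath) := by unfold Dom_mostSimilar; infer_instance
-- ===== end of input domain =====

-- B replaces A's lru_cache top-down recursion (re-run during path reconstruction) by a
-- bottom-up tabulation of cost/parent tables, an argmin scan and a backward parent walk.

-- ===== PORT A =====
-- shared helper: BOTH Pythons build the adjacency list with the same two lines
-- (graph[road[0]].append(road[1]); graph[road[1]].append(road[0]))
def pvBuildGraph (n : Int) (roads : List (List Int)) : List (List Int) :=
  roads.foldl (fun g road =>
    let a := PySem.List.pyGetD road 0 0      -- road[0] (a short road raises IndexError: outside Pre_)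
    let b := PySem.List.pyGetD road 1 0
    let g1 := PySem.List.pySetD g a (PySem.List.pyGetD g a [] ++ [b])
    PySem.List.pySetD g1 b (PySem.List.pyGetD g1 b [] ++ [a]))
    (List.replicate n.toNat [])

-- shared helper: Python's '<' against float('inf'); a cost is `none` exactly when it is inf,
-- every finite cost is an Int, so this comparison is exact
def pvLt : Option Int → Option Int → Bool
  | some x, some y => x < y
  | some _, none => true
  | _, _ => false

-- dp(path_length, node) of A, indexed by path_length + 1 so that level 0 is A's base case
-- path_length == -1; `none` cost is A's float('inf'), `.map (·+1)` is A's inf + 1 == inf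
def pvDp (graph : List (List Int)) (names targetPath : List String) : Nat → Int → Option Int × Option Int
  | 0, _ => (some 0, none)
  | k+1, node =>
    let st := (PySem.List.pyGetD graph node []).foldl
      (fun (st : Option Int × Option Int) adj =>
        let prev := (pvDp graph names targetPath k adj).1
        if pvLt prev st.1 then (prev, some adj) else st)
      (none, none)
    (if PySem.List.pyGetD names node "" ≠ PySem.List.pyGetD targetPath (k : Int) "" then st.1.map (· + 1) else st.1, st.2)

def mostSimilar (n : Int) (roads : List (List Int)) (names : List String) (targetPath : List String) : List Int :=
  let graph := pvBuildGraph n roads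
  let L := targetPath.length
  let sel := (PySem.List.pyRange 0 n 1).foldl
    (fun (st : Option Int × Option Int) i =>
      let dis := (pvDp graph names targetPath L i).1
      if pvLt dis st.1 then (dis, some i) else st)
    (none, none)
  let walk := (PySem.List.pyRange ((L : Int) - 1) 0 (-1)).foldl
    (fun (st : List (Option Int) × Option Int) idx =>
      -- dp(idx, end); Python raises TypeError when end is None (outside Pre_): we read it as 0
      let e := (pvDp graph names targetPath (idx.toNat + 1) (st.2.getD 0)).2
      (st.1 ++ [e], e))
    ([sel.2], sel.2)
  -- path[::-1]; path holds ints on Pre_ (None only outside it): we read a None entry as 0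
  ((PySem.List.slice? walk.1 none none (-1)).getD []).map (fun o => o.getD 0)

-- ===== PORT B =====
-- _best(graph, names, prev, v, tgt) of Source B
def pvLevelStep (graph : List (List Int)) (names : List String) (prev : List (Option Int)) (v : Int) (tgt : String) : Option Int × Option Int :=
  let best := (PySem.List.pyGetD graph v []).foldl
    (fun (b : Option Int × Option Int) adj =>
      let p := PySem.List.pyGetD prev adj none
      if pvLt p b.1 then (p, some adj) else b)
    (none, none)
  if PySem.List.pyGetD names v "" ≠ tgt then (best.1.map (· + 1), best.2) else best

def mostSimilar_alt (n : Int) (roads : List (List Int)) (names : List String) (targetPath : List String) : List Int :=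
  let graph := pvBuildGraph n roads
  let tab := targetPath.foldl
    (fun (st : List (Option Int) × List (List (Option Int))) tgt =>
      let level := (PySem.List.pyRange 0 n 1).map (fun v => pvLevelStep graph names st.1 v tgt)
      (level.map Prod.fst, st.2 ++ [level.map Prod.snd]))
    (List.replicate n.toNat (some 0), [])
  let prev := tab.1
  let sel := (PySem.List.pyRange 1 n 1).foldl
    (fun (st : Option Int × Int) v =>
      let p := PySem.List.pyGetD prev v none
      if pvLt p st.1 then (p, v) else st)
    (PySem.List.pyGetD prev 0 none, 0)
  let walk := ((PySem.List.slice tab.2 (some 1) none).reverse).foldl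
    (fun (st : List Int × Int) par =>
      -- par[end]; a None parent raises TypeError one step later in Python (outside Pre_): read as 0
      let e := (PySem.List.pyGetD par st.2 none).getD 0
      (st.1 ++ [e], e))
    ([sel.2], sel.2)
  walk.1.reverse

-- ===== PRECONDITION & SPEC =====
-- Pre_ excludes: node ids outside [-n, n) or roads shorter than 2 (A raises IndexError); negative
-- node ids when len(names) ≠ n (Python's negative-index wraparound then reads names from the end,
-- an accident both programs need not share); n < 1, or a nonempty targetPath with names shorter
-- than n (A raises IndexError) or with no roads (A returns [None], not a list of ints).
def Pre_mostSimilar (n : Int) (roads : List (List Int)) (names : List String) (targetPath : List String) : Prop :=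
  1 ≤ n ∧
  (∀ road ∈ roads, 2 ≤ road.length ∧
    -n ≤ road.getD 0 0 ∧ road.getD 0 0 < n ∧ -n ≤ road.getD 1 0 ∧ road.getD 1 0 < n) ∧
  (targetPath = [] ∨ (n ≤ (names.length : Int) ∧ roads ≠ [])) ∧
  ((∀ road ∈ roads, 0 ≤ road.getD 0 0 ∧ 0 ≤ road.getD 1 0) ∨ (names.length : Int) = n)
instance (n : Int) (roads : List (List Int)) (names : List String) (targetPath : List String) : Decidable (Pre_mostSimilar n roads names targetPath) := by unfold Pre_mostSimilar; infer_instance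

def pvWitness_mostSimilar : Int × List (List Int) × List String × List String :=
  (3, [[0,1],[1,2]], ["a","b","c"], ["a","c","b"])

def Spec_mostSimilar (n : Int) (roads : List (List Int)) (names : List String) (targetPath : List String) (out : List Int) : Prop := out = mostSimilar_alt n roads names targetPath
instance (n : Int) (roads : List (List Int)) (names : List String) (targetPath : List String) (out : List Int) : Decidable (Spec_mostSimilar n roads names targetPath out) := by unfold Spec_mostSimilar; infer_instance

-- ===== CLAIM (what is proved, stated in full; the proofs are below) =====
def Claim_equal_mostSimilar : Prop := ∀ (n : Int) (roads : List (List Int)) (names : List String) (targetPath : List String), Dom_mostSimilar n roads names targetPath → Pre_mostSimilar n roads names targetPath → Spec_mostSimilar n roads names targetPath (mostSimilar n roads names targetPath)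

-- ===== LEMMAS AND PROOFS =====

-- k-th cost / parent column of the dp table, phrased through A's dp
def pvPrevT (graph : List (List Int)) (names tp : List String) (n : Int) (k : Nat) : List (Option Int) :=
  (PySem.List.pyRange 0 n 1).map (fun v => (pvDp graph names tp k v).1)
def pvParT (graph : List (List Int)) (names tp : List String) (n : Int) (k : Nat) : List (Option Int) :=
  (PySem.List.pyRange 0 n 1).map (fun v => (pvDp graph names tp k v).2)

-- [m, m-1, …, 1]
def pvCdown : Nat → List Nat
  | 0 => []
  | m+1 => (m+1) :: pvCdown m

lemma pvCdown_cast (m : Nat) :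
    PySem.List.pyRange (m : Int) 0 (-1) = (pvCdown m).map (fun k => (k : Int)) := by
  induction m with
  | zero => simp [pvCdown, PySem.List.pyRange_neg_one_eq_nil]
  | succ m ih =>
    rw [PySem.List.pyRange_neg_one_cons (by push_cast; omega)]
    push_cast
    simp only [pvCdown]
    rw [show ((m:Int) + 1 - 1) = (m:Int) by ring, ih]
    rfl

lemma pvRevRange (α : Type) (g : Nat → α) (m : Nat) :
    ((List.range m).map (fun j => g (j+1))).reverse = (pvCdown m).map g := by
  induction m with
  | zero => simp [pvCdown]
  | succ m ih => simp [List.range_succ, pvCdown, ih]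

lemma pvParentsDrop (α : Type) (g : Nat → α) (m : Nat) :
    (((List.range m).map g).drop 1).reverse = (pvCdown (m-1)).map (fun k => g k) := by
  cases m with
  | zero => simp [pvCdown]
  | succ m =>
    have h1 : ((List.range (m+1)).map g).drop 1 = (List.range m).map (fun j => g (j+1)) := by
      simp [List.range_succ_eq_map, Function.comp]
    rw [h1, pvRevRange]
    rfl

lemma pvSel_agree (g h : Int → Option Int) :
    ∀ (l : List Int) (stA : Option Int × Option Int) (stB : Option Int × Int),
    (∀ v ∈ l, g v = h v) → stA.1 = stB.1 → stA.2.getD 0 = stB.2 →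
    (l.foldl (fun st i => if pvLt (g i) st.1 then (g i, some i) else st) stA).1
      = (l.foldl (fun st v => if pvLt (h v) st.1 then (h v, v) else st) stB).1 ∧
    (l.foldl (fun st i => if pvLt (g i) st.1 then (g i, some i) else st) stA).2.getD 0
      = (l.foldl (fun st v => if pvLt (h v) st.1 then (h v, v) else st) stB).2 := by
  intro l
  induction l with
  | nil => intro stA stB _ h1 h2; exact ⟨h1, h2⟩
  | cons x xs ih =>
    intro stA stB hgh h1 h2
    simp only [List.foldl_cons]
    have hx : g x = h x := hgh x (by simp)
    rw [hx, h1]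
    by_cases hc : pvLt (h x) stB.1 = true
    · rw [if_pos hc, if_pos hc]
      exact ih _ _ (fun v hv => hgh v (by simp [hv])) rfl rfl
    · rw [if_neg hc, if_neg hc]
      exact ih _ _ (fun v hv => hgh v (by simp [hv])) h1 h2

lemma pvSel_snd_mem (h : Int → Option Int) :
    ∀ (l : List Int) (stB : Option Int × Int),
    (l.foldl (fun st v => if pvLt (h v) st.1 then (h v, v) else st) stB).2 = stB.2 ∨
    (l.foldl (fun st v => if pvLt (h v) st.1 then (h v, v) else st) stB).2 ∈ l := by
  intro l
  induction l with
  | nil => intro stB; exact Or.inl rfl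
  | cons x xs ih =>
    intro stB
    simp only [List.foldl_cons]
    rcases ih (if pvLt (h x) stB.1 then (h x, x) else stB) with h1 | h1
    · rw [h1]
      by_cases hc : pvLt (h x) stB.1 = true
      · simp [hc]
      · simp [hc]
    · exact Or.inr (by simp [h1])

lemma pvGetD_list_cases (g : List (List Int)) (i : Int) :
    PySem.List.pyGetD g i ([] : List Int) ∈ g ∨ PySem.List.pyGetD g i ([] : List Int) = [] := by
  by_cases hr : PySem.Raise.InRange g.length i
  · exact Or.inl (PySem.List.pyGetD_mem g [] hr)
  · exact Or.inr (PySem.List.pyGetD_of_none g i [] ((PySem.List.pyGet?_eq_none_iff g i).2 hr))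

lemma pvSetD_mem {g : List (List Int)} {i : Int} {v l : List Int}
    (hl : l ∈ PySem.List.pySetD g i v) : l ∈ g ∨ l = v := by
  unfold PySem.List.pySetD PySem.List.pySet? at hl
  cases h : PySem.List.pyIdx? g.length i with
  | none => rw [h] at hl; simpa using Or.inl hl
  | some k =>
    rw [h] at hl
    simp only [Option.map_some, Option.getD_some] at hl
    exact List.mem_or_eq_of_mem_set hl

lemma pvBuildGraph_len (n : Int) (roads : List (List Int)) :
    (pvBuildGraph n roads).length = n.toNat := by
  unfold pvBuildGraph
  suffices H : ∀ (rs : List (List Int)) (g : List (List Int)),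
      (rs.foldl (fun g road =>
        let a := PySem.List.pyGetD road 0 0
        let b := PySem.List.pyGetD road 1 0
        let g1 := PySem.List.pySetD g a (PySem.List.pyGetD g a [] ++ [b])
        PySem.List.pySetD g1 b (PySem.List.pyGetD g1 b [] ++ [a])) g).length = g.length by
    rw [H]; exact List.length_replicate
  intro rs
  induction rs with
  | nil => intro g; rfl
  | cons r rs ih =>
    intro g
    simp only [List.foldl_cons]
    rw [ih, PySem.List.length_pySetD, PySem.List.length_pySetD]

lemma pvBuildGraph_mem (lo n : Int) (roads : List (List Int))
    (h : ∀ road ∈ roads, 2 ≤ road.length ∧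
      lo ≤ road.getD 0 0 ∧ road.getD 0 0 < n ∧ lo ≤ road.getD 1 0 ∧ road.getD 1 0 < n) :
    ∀ l ∈ pvBuildGraph n roads, ∀ x ∈ l, lo ≤ x ∧ x < n := by
  unfold pvBuildGraph
  suffices H : ∀ (rs : List (List Int)) (g : List (List Int)),
      (∀ road ∈ rs, 2 ≤ road.length ∧
        lo ≤ road.getD 0 0 ∧ road.getD 0 0 < n ∧ lo ≤ road.getD 1 0 ∧ road.getD 1 0 < n) →
      (∀ l ∈ g, ∀ x ∈ l, lo ≤ x ∧ x < n) →
      ∀ l ∈ rs.foldl (fun g road =>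
        let a := PySem.List.pyGetD road 0 0
        let b := PySem.List.pyGetD road 1 0
        let g1 := PySem.List.pySetD g a (PySem.List.pyGetD g a [] ++ [b])
        PySem.List.pySetD g1 b (PySem.List.pyGetD g1 b [] ++ [a])) g, ∀ x ∈ l, lo ≤ x ∧ x < n by
    exact H roads _ h (by intro l hl; simp [List.eq_of_mem_replicate hl])
  intro rs
  induction rs with
  | nil => intro g _ hg; simpa using hg
  | cons r rs ih =>
    intro g hr hg
    simp only [List.foldl_cons]
    apply ih _ (fun road hrd => hr road (by simp [hrd]))
    -- the new accumulator still satisfies the invariant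
    obtain ⟨hlen, ha0, ha1, hb0, hb1⟩ := hr r (by simp)
    have hget0 : PySem.List.pyGetD r 0 (0:Int) = r.getD 0 0 := by
      simpa using PySem.List.pyGetD_natCast (xs := r) (n := 0) (d := (0:Int))
    have hget1 : PySem.List.pyGetD r 1 (0:Int) = r.getD 1 0 := by
      simpa using PySem.List.pyGetD_natCast (xs := r) (n := 1) (d := (0:Int))
    intro l hl x hx
    rcases pvSetD_mem hl with hl2 | hl2
    · rcases pvSetD_mem hl2 with hl3 | hl3
      · exact hg l hl3 x hx
      · subst hl3
        rcases List.mem_append.1 hx with hx2 | hx2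
        · rcases pvGetD_list_cases g (PySem.List.pyGetD r 0 0) with hc | hc
          · exact hg _ hc x hx2
          · rw [hc] at hx2; cases hx2
        · simp at hx2; subst hx2; rw [hget1]; omega
    · subst hl2
      rcases List.mem_append.1 hx with hx2 | hx2
      · rcases pvGetD_list_cases _ (PySem.List.pyGetD r 1 0) with hc | hc
        · rcases pvSetD_mem hc with hl3 | hl3
          · exact hg _ hl3 x hx2
          · rw [hl3] at hx2
            rcases List.mem_append.1 hx2 with hx3 | hx3
            · rcases pvGetD_list_cases g (PySem.List.pyGetD r 0 0) with hc2 | hc2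
              · exact hg _ hc2 x hx3
              · rw [hc2] at hx3; cases hx3
            · simp at hx3; subst hx3; rw [hget1]; omega
        · rw [hc] at hx2; cases hx2
      · simp at hx2; subst hx2; rw [hget0]; omega

lemma pvGetD_wrap {α : Type} (xs : List α) (i : Int) (d : α)
    (h1 : -(xs.length : Int) ≤ i) (h2 : i < 0) :
    PySem.List.pyGetD xs i d = PySem.List.pyGetD xs (i + xs.length) d := by
  have hk1 : 0 < (-i).toNat := by omega
  have hk2 : (-i).toNat ≤ xs.length := by omega
  have hi : i = -(((-i).toNat : Nat) : Int) := by omega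
  rw [hi, PySem.List.pyGetD_neg_natCast xs (-i).toNat d hk1 hk2]
  rw [PySem.List.pyGetD_eq_getElem xs d (by omega) (by omega)]
  congr 1
  omega

lemma pvGetD_map_pyRange_neg {β : Type} (f : Int → β) (n e : Int) (d : β)
    (h1 : -n ≤ e) (h2 : e < 0) :
    PySem.List.pyGetD ((PySem.List.pyRange 0 n 1).map f) e d = f (e + n) := by
  have hn0 : 0 < n := by omega
  have hlen : ((((PySem.List.pyRange 0 n 1).map f)).length : Int) = n := by
    rw [List.length_map, PySem.List.length_pyRange_one]
    omega
  rw [pvGetD_wrap _ e d (by omega) h2, hlen]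
  exact PySem.List.pyGetD_map_pyRange_of_nonneg f n (e + n) d (by omega) (by omega)

lemma pvDp_congr_node (graph : List (List Int)) (names tp : List String) (k : Nat) (a b : Int)
    (h1 : PySem.List.pyGetD graph a ([] : List Int) = PySem.List.pyGetD graph b [])
    (h2 : PySem.List.pyGetD names a "" = PySem.List.pyGetD names b "") :
    pvDp graph names tp k a = pvDp graph names tp k b := by
  cases k with
  | zero => rfl
  | succ k => simp only [pvDp, h1, h2]

lemma pvDp_wrap (graph : List (List Int)) (names tp : List String) (n : Int)
    (hGlen : ((graph.length : Int)) = n) (hNlen : ((names.length : Int)) = n)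
    (k : Nat) (e : Int) (h1 : -n ≤ e) (h2 : e < 0) :
    pvDp graph names tp k e = pvDp graph names tp k (e + n) := by
  apply pvDp_congr_node
  · rw [pvGetD_wrap graph e [] (by omega) h2, hGlen]
  · rw [pvGetD_wrap names e "" (by omega) h2, hNlen]

lemma pvFold_snd (step : Option Int × Option Int → Int → Option Int) :
    ∀ (l : List Int) (st : Option Int × Option Int),
    (l.foldl (fun st adj => if pvLt (step st adj) st.1 then (step st adj, some adj) else st) st).2 = st.2 ∨
    ∃ a ∈ l, (l.foldl (fun st adj => if pvLt (step st adj) st.1 then (step st adj, some adj) else st) st).2 = some a := by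
  intro l
  induction l with
  | nil => intro st; exact Or.inl rfl
  | cons x xs ih =>
    intro st
    simp only [List.foldl_cons]
    rcases ih (if pvLt (step st x) st.1 then (step st x, some x) else st) with h1 | h1
    · rw [h1]
      by_cases hc : pvLt (step st x) st.1 = true
      · exact Or.inr ⟨x, by simp, by simp [hc]⟩
      · rw [if_neg hc]; exact Or.inl rfl
    · obtain ⟨a, ha, h2⟩ := h1
      exact Or.inr ⟨a, by simp [ha], h2⟩

lemma pvDp_snd (graph : List (List Int)) (names tp : List String) (k : Nat) (v : Int) :
    (pvDp graph names tp k v).2 = none ∨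
      ∃ a, (pvDp graph names tp k v).2 = some a ∧ ∃ l ∈ graph, a ∈ l := by
  cases k with
  | zero => exact Or.inl rfl
  | succ k =>
    have h2 : (pvDp graph names tp (k+1) v).2
        = ((PySem.List.pyGetD graph v []).foldl
            (fun (st : Option Int × Option Int) adj =>
              if pvLt (pvDp graph names tp k adj).1 st.1 then ((pvDp graph names tp k adj).1, some adj) else st)
            (none, none)).2 := by
      simp only [pvDp]
    rw [h2]
    rcases pvFold_snd (fun st adj => (pvDp graph names tp k adj).1) (PySem.List.pyGetD graph v []) (none, none) with h | h
    · exact Or.inl h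
    · obtain ⟨a, ha, h3⟩ := h
      rcases pvGetD_list_cases graph v with hc | hc
      · exact Or.inr ⟨a, h3, _, hc, ha⟩
      · rw [hc] at ha; cases ha

lemma pvLevel_eq (graph : List (List Int)) (names tp : List String) (n : Int)
    (k : Nat)
    (hprev : ∀ adj : Int, (∃ l ∈ graph, adj ∈ l) →
      PySem.List.pyGetD (pvPrevT graph names tp n k) adj none = (pvDp graph names tp k adj).1)
    (tgt : String) (ht : PySem.List.pyGetD tp (k : Int) "" = tgt) :
    (PySem.List.pyRange 0 n 1).map (fun v => pvLevelStep graph names (pvPrevT graph names tp n k) v tgt)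
      = (PySem.List.pyRange 0 n 1).map (fun v => pvDp graph names tp (k+1) v) := by
  apply List.map_congr_left
  intro v _
  unfold pvLevelStep
  have hfold : (PySem.List.pyGetD graph v []).foldl
      (fun (b : Option Int × Option Int) adj =>
        let p := PySem.List.pyGetD (pvPrevT graph names tp n k) adj none
        if pvLt p b.1 then (p, some adj) else b)
      (none, none)
    = (PySem.List.pyGetD graph v []).foldl
      (fun (st : Option Int × Option Int) adj =>
        let prev := (pvDp graph names tp k adj).1
        if pvLt prev st.1 then (prev, some adj) else st)
      (none, none) := by
    apply PySem.List.foldl_congr_mem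
    intro acc x hx
    have hmem : ∃ l ∈ graph, x ∈ l := by
      rcases pvGetD_list_cases graph v with hc | hc
      · exact ⟨_, hc, hx⟩
      · rw [hc] at hx; cases hx
    simp only [hprev x hmem]
  rw [hfold]
  simp only [pvDp]
  rw [ht]
  by_cases hc : PySem.List.pyGetD names v "" ≠ tgt
  · rw [if_pos hc, if_pos hc]
  · rw [if_neg hc, if_neg hc]

lemma pvTab_eq (graph : List (List Int)) (names tp : List String) (n : Int)
    (hP : ∀ (k : Nat) (adj : Int), (∃ l ∈ graph, adj ∈ l) →
      PySem.List.pyGetD (pvPrevT graph names tp n k) adj none = (pvDp graph names tp k adj).1) :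
    ∀ (suf pre : List String), tp = pre ++ suf →
    suf.foldl
      (fun (st : List (Option Int) × List (List (Option Int))) tgt =>
        let level := (PySem.List.pyRange 0 n 1).map (fun v => pvLevelStep graph names st.1 v tgt)
        (level.map Prod.fst, st.2 ++ [level.map Prod.snd]))
      (pvPrevT graph names tp n pre.length,
        (List.range pre.length).map (fun j => pvParT graph names tp n (j+1)))
    = (pvPrevT graph names tp n tp.length,
        (List.range tp.length).map (fun j => pvParT graph names tp n (j+1))) := by
  intro suf
  induction suf with
  | nil => intro pre hpre; simp [hpre]
  | cons tgt rest ih =>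
    intro pre hpre
    simp only [List.foldl_cons]
    have ht : PySem.List.pyGetD tp (pre.length : Int) "" = tgt := by
      rw [PySem.List.pyGetD_natCast, hpre]
      simp [List.getD]
    have hlv := pvLevel_eq graph names tp n pre.length (hP pre.length) tgt ht
    have h1 : ((PySem.List.pyRange 0 n 1).map (fun v => pvLevelStep graph names (pvPrevT graph names tp n pre.length) v tgt)).map Prod.fst
        = pvPrevT graph names tp n (pre.length + 1) := by
      rw [hlv]; unfold pvPrevT; rw [List.map_map]; rfl
    have h2 : ((PySem.List.pyRange 0 n 1).map (fun v => pvLevelStep graph names (pvPrevT graph names tp n pre.length) v tgt)).map Prod.snd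
        = pvParT graph names tp n (pre.length + 1) := by
      rw [hlv]; unfold pvParT; rw [List.map_map]; rfl
    simp only [h1, h2]
    have h3 : (List.range pre.length).map (fun j => pvParT graph names tp n (j+1)) ++ [pvParT graph names tp n (pre.length + 1)]
        = (List.range (pre ++ [tgt]).length).map (fun j => pvParT graph names tp n (j+1)) := by
      simp [List.range_succ]
    have h4 : pvPrevT graph names tp n (pre.length + 1) = pvPrevT graph names tp n (pre ++ [tgt]).length := by
      simp
    rw [h3, h4]
    exact ih (pre ++ [tgt]) (by simp [hpre])

lemma pvWalk_agree (graph : List (List Int)) (names tp : List String) (n lo : Int)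
    (GG : ∀ l ∈ graph, ∀ x ∈ l, lo ≤ x ∧ x < n) (hn : 1 ≤ n) (hlo : lo ≤ 0)
    (hpar : ∀ (m : Nat) (e : Int), lo ≤ e → e < n →
      PySem.List.pyGetD (pvParT graph names tp n m) e none = (pvDp graph names tp m e).2) :
    ∀ (ks : List Nat) (stA : List (Option Int) × Option Int) (stB : List Int × Int),
    stA.1.map (fun o => o.getD 0) = stB.1 → stA.2.getD 0 = stB.2 → lo ≤ stB.2 → stB.2 < n →
    ((ks.map (fun k => (k : Int))).foldl
        (fun (st : List (Option Int) × Option Int) idx =>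
          let e := (pvDp graph names tp (idx.toNat + 1) (st.2.getD 0)).2
          (st.1 ++ [e], e)) stA).1.map (fun o => o.getD 0)
      = ((ks.map (fun k => pvParT graph names tp n (k+1))).foldl
        (fun (st : List Int × Int) par =>
          let e := (PySem.List.pyGetD par st.2 none).getD 0
          (st.1 ++ [e], e)) stB).1 := by
  intro ks
  induction ks with
  | nil => intro stA stB h1 _ _ _; exact h1
  | cons k ks ih =>
    intro stA stB h1 h2 hb0 hb1
    simp only [List.map_cons, List.foldl_cons]
    have htn : ((k : Int)).toNat = k := by simp
    have hparB : PySem.List.pyGetD (pvParT graph names tp n (k+1)) stB.2 none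
        = (pvDp graph names tp (k+1) stB.2).2 := hpar (k+1) stB.2 hb0 hb1
    have he : (pvDp graph names tp ((k : Int)).toNat.succ (stA.2.getD 0)).2
        = (pvDp graph names tp (k+1) stB.2).2 := by rw [htn, h2]
    have hbound : lo ≤ ((pvDp graph names tp (k+1) stB.2).2.getD 0) ∧
        ((pvDp graph names tp (k+1) stB.2).2.getD 0) < n := by
      rcases pvDp_snd graph names tp (k+1) stB.2 with h | h
      · rw [h]; simp; omega
      · obtain ⟨a, ha, l, hl, hal⟩ := h
        rw [ha]; simpa using GG l hl a hal
    apply ih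
    · simp only [List.map_append, h1, he, hparB]
      rfl
    · simp only [he, hparB]
    · simpa only [hparB] using hbound.1
    · simpa only [hparB] using hbound.2

lemma pvCdown_cast' (L : Nat) :
    PySem.List.pyRange ((L : Int) - 1) 0 (-1) = (pvCdown (L-1)).map (fun k => (k : Int)) := by
  cases L with
  | zero => simp [pvCdown, PySem.List.pyRange_neg_one_eq_nil]
  | succ L =>
    have : ((L+1 : Nat) : Int) - 1 = (L : Int) := by push_cast; ring
    rw [this]
    exact pvCdown_cast L


lemma pvAssemble (G : List (List Int)) (names tp : List String) (n lo : Int)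
    (GG : ∀ l ∈ G, ∀ x ∈ l, lo ≤ x ∧ x < n) (hn : 1 ≤ n) (hlo : lo ≤ 0)
    (hpar : ∀ (m : Nat) (e : Int), lo ≤ e → e < n →
      PySem.List.pyGetD (pvParT G names tp n m) e none = (pvDp G names tp m e).2)
    (iA : Option Int × Option Int) (iB : Option Int × Int)
    (h1 : iA.1 = iB.1) (h2 : iA.2.getD 0 = iB.2)
    (hb : iB.2 = 0 ∨ iB.2 ∈ PySem.List.pyRange 1 n 1) :
    List.map (fun o => o.getD 0)
      ((List.foldl
          (fun (st : List (Option Int) × Option Int) idx =>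
            (st.1 ++ [(pvDp G names tp (idx.toNat + 1) (st.2.getD 0)).2],
              (pvDp G names tp (idx.toNat + 1) (st.2.getD 0)).2))
          ([(List.foldl
              (fun (st : Option Int × Option Int) i =>
                if pvLt (pvDp G names tp tp.length i).1 st.1 then ((pvDp G names tp tp.length i).1, some i) else st)
              iA (PySem.List.pyRange 1 n 1)).2],
            (List.foldl
              (fun (st : Option Int × Option Int) i =>
                if pvLt (pvDp G names tp tp.length i).1 st.1 then ((pvDp G names tp tp.length i).1, some i) else st)
              iA (PySem.List.pyRange 1 n 1)).2)
          (PySem.List.pyRange ((tp.length : Int) - 1) 0 (-1))).1.reverse)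
    = (List.foldl
          (fun (st : List Int × Int) par =>
            (st.1 ++ [(PySem.List.pyGetD par st.2 none).getD 0], (PySem.List.pyGetD par st.2 none).getD 0))
          ([(List.foldl
              (fun (st : Option Int × Int) v =>
                if pvLt (PySem.List.pyGetD (pvPrevT G names tp n tp.length) v none) st.1
                then (PySem.List.pyGetD (pvPrevT G names tp n tp.length) v none, v) else st)
              iB (PySem.List.pyRange 1 n 1)).2],
            (List.foldl
              (fun (st : Option Int × Int) v =>
                if pvLt (PySem.List.pyGetD (pvPrevT G names tp n tp.length) v none) st.1
                then (PySem.List.pyGetD (pvPrevT G names tp n tp.length) v none, v) else st)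
              iB (PySem.List.pyRange 1 n 1)).2)
          (PySem.List.slice ((List.range tp.length).map (fun j => pvParT G names tp n (j+1))) (some 1) none).reverse).1.reverse := by
  have hv : ∀ v ∈ PySem.List.pyRange 1 n 1,
      (fun i => (pvDp G names tp tp.length i).1) v
        = (fun v => PySem.List.pyGetD (pvPrevT G names tp n tp.length) v none) v := by
    intro v hvm
    have hbv := (PySem.List.mem_pyRange_one (a := 1) (b := n) (x := v)).1 hvm
    simp only [pvPrevT]
    exact (PySem.List.pyGetD_map_pyRange_of_nonneg
      (fun v => (pvDp G names tp tp.length v).1) n v none (by omega) hbv.2).symm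
  have hsel := pvSel_agree (fun i => (pvDp G names tp tp.length i).1)
      (fun v => PySem.List.pyGetD (pvPrevT G names tp n tp.length) v none)
      (PySem.List.pyRange 1 n 1) iA iB hv h1 h2
  have hmem := pvSel_snd_mem (fun v => PySem.List.pyGetD (pvPrevT G names tp n tp.length) v none)
      (PySem.List.pyRange 1 n 1) iB
  have hbounds : lo ≤ (List.foldl
      (fun (st : Option Int × Int) v =>
        if pvLt (PySem.List.pyGetD (pvPrevT G names tp n tp.length) v none) st.1
        then (PySem.List.pyGetD (pvPrevT G names tp n tp.length) v none, v) else st)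
      iB (PySem.List.pyRange 1 n 1)).2 ∧ (List.foldl
      (fun (st : Option Int × Int) v =>
        if pvLt (PySem.List.pyGetD (pvPrevT G names tp n tp.length) v none) st.1
        then (PySem.List.pyGetD (pvPrevT G names tp n tp.length) v none, v) else st)
      iB (PySem.List.pyRange 1 n 1)).2 < n := by
    rcases hmem with hm | hm
    · rw [hm]
      rcases hb with hb | hb
      · omega
      · have := (PySem.List.mem_pyRange_one (a := 1) (b := n) (x := iB.2)).1 hb
        omega
    · have := (PySem.List.mem_pyRange_one (a := 1) (b := n)).1 hm
      omega
  rw [pvCdown_cast' tp.length, PySem.List.slice_from_one, ← List.drop_one, pvParentsDrop,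
    List.map_reverse]
  congr 1
  exact pvWalk_agree G names tp n lo GG hn hlo hpar (pvCdown (tp.length - 1)) _ _
    (by simp [hsel.2]) hsel.2 hbounds.1 hbounds.2

-- ===== VERDICT (by name: the statement is the Claim_ definition above) =====
theorem mostSimilar_spec : Claim_equal_mostSimilar := by
  intro n roads names tp _ hpre
  obtain ⟨hn, hroads, hrt, hcase⟩ := hpre
  unfold Spec_mostSimilar
  -- adjacency-entry bounds and dp-table lookup laws, in both Pre_ cases
  obtain ⟨lo, GG, hlo, hP, hpar⟩ :
      ∃ lo : Int, (∀ l ∈ pvBuildGraph n roads, ∀ x ∈ l, lo ≤ x ∧ x < n) ∧ lo ≤ 0 ∧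
        (∀ (k : Nat) (adj : Int), (∃ l ∈ pvBuildGraph n roads, adj ∈ l) →
          PySem.List.pyGetD (pvPrevT (pvBuildGraph n roads) names tp n k) adj none
            = (pvDp (pvBuildGraph n roads) names tp k adj).1) ∧
        (∀ (m : Nat) (e : Int), lo ≤ e → e < n →
          PySem.List.pyGetD (pvParT (pvBuildGraph n roads) names tp n m) e none
            = (pvDp (pvBuildGraph n roads) names tp m e).2) := by
    rcases hcase with hpos | hlen
    · have GG0 := pvBuildGraph_mem 0 n roads (by
        intro road hr
        have h1 := hroads road hr
        have h2 := hpos road hr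
        exact ⟨h1.1, h2.1, h1.2.2.1, h2.2, h1.2.2.2.2⟩)
      refine ⟨0, GG0, le_refl 0, ?_, ?_⟩
      · intro k adj hm
        obtain ⟨l, hl, hal⟩ := hm
        have hb := GG0 l hl adj hal
        simp only [pvPrevT]
        exact PySem.List.pyGetD_map_pyRange_of_nonneg
          (fun v => (pvDp (pvBuildGraph n roads) names tp k v).1) n adj none hb.1 hb.2
      · intro m e he1 he2
        simp only [pvParT]
        exact PySem.List.pyGetD_map_pyRange_of_nonneg
          (fun v => (pvDp (pvBuildGraph n roads) names tp m v).2) n e none he1 he2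
    · have GGn := pvBuildGraph_mem (-n) n roads (by
        intro road hr
        have h1 := hroads road hr
        exact ⟨h1.1, h1.2.1, h1.2.2.1, h1.2.2.2.1, h1.2.2.2.2⟩)
      have hGlen : ((pvBuildGraph n roads).length : Int) = n := by
        rw [pvBuildGraph_len]; omega
      refine ⟨-n, GGn, by omega, ?_, ?_⟩
      · intro k adj hm
        obtain ⟨l, hl, hal⟩ := hm
        have hb := GGn l hl adj hal
        simp only [pvPrevT]
        rcases le_or_gt 0 adj with hs | hs
        · exact PySem.List.pyGetD_map_pyRange_of_nonneg
            (fun v => (pvDp (pvBuildGraph n roads) names tp k v).1) n adj none hs hb.2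
        · rw [pvGetD_map_pyRange_neg
            (fun v => (pvDp (pvBuildGraph n roads) names tp k v).1) n adj none hb.1 hs,
            ← pvDp_wrap (pvBuildGraph n roads) names tp n hGlen hlen k adj hb.1 hs]
      · intro m e he1 he2
        simp only [pvParT]
        rcases le_or_gt 0 e with hs | hs
        · exact PySem.List.pyGetD_map_pyRange_of_nonneg
            (fun v => (pvDp (pvBuildGraph n roads) names tp m v).2) n e none hs he2
        · rw [pvGetD_map_pyRange_neg
            (fun v => (pvDp (pvBuildGraph n roads) names tp m v).2) n e none he1 hs,
            ← pvDp_wrap (pvBuildGraph n roads) names tp n hGlen hlen m e he1 hs]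
  simp only [mostSimilar, mostSimilar_alt]
  set G := pvBuildGraph n roads with hG
  rw [PySem.List.slice?_none_none_neg_one]
  -- the bottom-up table is A's dp, level by level
  have hinit : pvPrevT G names tp n 0 = List.replicate n.toNat (some 0) := by
    unfold pvPrevT
    simp only [pvDp]
    rw [List.map_const']
    simp [PySem.List.length_pyRange_one]
  have htab := pvTab_eq G names tp n hP tp [] rfl
  simp only [List.length_nil, List.range_zero, List.map_nil] at htab
  rw [hinit] at htab
  rw [htab]
  simp only [Option.getD_some]
  -- the argmin scans agree
  have hp0 : PySem.List.pyGetD (pvPrevT G names tp n tp.length) 0 none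
      = (pvDp G names tp tp.length 0).1 :=
    PySem.List.pyGetD_map_pyRange_of_nonneg _ n 0 none le_rfl (by omega)
  rw [PySem.List.pyRange_one_cons (show (0:Int) < n by omega)]
  simp only [List.foldl_cons, hp0]
  cases h0 : (pvDp G names tp tp.length 0).1 with
  | none => exact pvAssemble G names tp n lo GG hn hlo hpar _ _ rfl rfl (Or.inl rfl)
  | some d => exact pvAssemble G names tp n lo GG hn hlo hpar _ _ rfl rfl (Or.inl rfl)
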